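-- pv_equiv track=rewrite | github.com/amyamadea/Python_Fundamental | statistik.py | getModus
-- ===== SOURCE A (Python) =====
-- def getModus(myDictionary, modus):
--     max = 0;
--
--     for key, value in myDictionary.items():
--         if (value>max):
--             max = value;
--
--     for key, value in myDictionary.items():
--         if (value==max):
--             modus.append(key);
--
--     if (len(modus)==len(myDictionary)):
--         modus = [];
--
--     return modus;
-- ===== SOURCE B (Python) =====
-- def getModus(myDictionary, modus):
--     best = 0
--     keys = []
--     for key, value in myDictionary.items():
--         if value > best:
--             best = value
--             keys = [key]
--         elif value == best:
--             keys.append(key)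
--     modus.extend(keys)
--     if len(modus) == len(myDictionary):
--         modus = []
--     return modus
-- ===== Notes on version B (the rewrite author's own statement) =====
-- stated objective: alternative
-- what changed: Replaces A's two full passes (one to find the max, one to collect matching keys) with a single pass that maintains the running maximum together with the list of keys achieving it, resetting the list on a new maximum.
import Mathlib
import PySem

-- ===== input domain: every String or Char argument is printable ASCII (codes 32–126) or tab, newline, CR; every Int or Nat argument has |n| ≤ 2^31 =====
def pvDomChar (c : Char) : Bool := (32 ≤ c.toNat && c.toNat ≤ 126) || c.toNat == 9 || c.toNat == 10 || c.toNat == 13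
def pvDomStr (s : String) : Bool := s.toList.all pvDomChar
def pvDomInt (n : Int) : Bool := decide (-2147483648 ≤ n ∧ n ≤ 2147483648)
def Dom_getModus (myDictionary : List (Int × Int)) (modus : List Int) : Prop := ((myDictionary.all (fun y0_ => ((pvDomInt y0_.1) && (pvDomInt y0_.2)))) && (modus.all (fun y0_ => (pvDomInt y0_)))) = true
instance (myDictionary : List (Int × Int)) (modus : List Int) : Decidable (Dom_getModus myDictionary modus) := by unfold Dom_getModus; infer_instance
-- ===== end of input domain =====

-- B fuses A's two passes into a single pass keeping the running max and its key list; same cost, different decomposition.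
-- A mutates `modus` in place (appends); B performs the same mutation via extend; the equivalence proved is about the return value.

-- ===== PORT A =====
def getModus (myDictionary : List (Int × Int)) (modus : List Int) : List Int :=
  let max := myDictionary.foldl (fun m p => if p.2 > m then p.2 else m) 0
  let modus' := myDictionary.foldl (fun acc p => if p.2 == max then acc ++ [p.1] else acc) modus
  if modus'.length == myDictionary.length then [] else modus'

-- ===== PORT B =====
def getModus_alt (myDictionary : List (Int × Int)) (modus : List Int) : List Int :=
  let s := myDictionary.foldl
    (fun (s : Int × List Int) p =>
      if p.2 > s.1 then (p.2, [p.1])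
      else if p.2 == s.1 then (s.1, s.2 ++ [p.1])
      else s) (0, [])
  let modus' := modus ++ s.2
  if modus'.length == myDictionary.length then [] else modus'

-- ===== PRECONDITION & SPEC =====
def Spec_getModus (myDictionary : List (Int × Int)) (modus : List Int) (out : List Int) : Prop := out = getModus_alt myDictionary modus
instance (myDictionary : List (Int × Int)) (modus : List Int) (out : List Int) : Decidable (Spec_getModus myDictionary modus out) := by unfold Spec_getModus; infer_instance

-- ===== CLAIM (what is proved, stated in full; the proofs are below) =====
def Claim_equal_getModus : Prop := ∀ (myDictionary : List (Int × Int)) (modus : List Int), Dom_getModus myDictionary modus → Spec_getModus myDictionary modus (getModus myDictionary modus)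

-- ===== LEMMAS AND PROOFS =====

lemma pvMaxGe (l : List (Int × Int)) (m : Int) :
    m ≤ l.foldl (fun a p => if p.2 > a then p.2 else a) m := by
  induction l generalizing m with
  | nil => simp
  | cons h t ih =>
    simp only [List.foldl_cons]
    split
    · exact le_trans (le_of_lt (by assumption)) (ih h.2)
    · exact ih m
/-- B's fused pass, characterised by A's two passes. -/
lemma pvPair (l : List (Int × Int)) (m : Int) (ks : List Int) :
    l.foldl
      (fun (s : Int × List Int) p =>
        if p.2 > s.1 then (p.2, [p.1])
        else if p.2 == s.1 then (s.1, s.2 ++ [p.1])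
        else s) (m, ks)
    = (l.foldl (fun a p => if p.2 > a then p.2 else a) m,
       (if l.foldl (fun a p => if p.2 > a then p.2 else a) m = m then ks else [])
         ++ (l.filter (fun p => p.2 == l.foldl (fun a p => if p.2 > a then p.2 else a) m)).map Prod.fst) := by
  induction l generalizing m ks with
  | nil => simp
  | cons hd t ih =>
    obtain ⟨k, v⟩ := hd
    simp only [List.foldl_cons, List.filter_cons]
    by_cases hv : v > m
    · have hget := pvMaxGe t v
      rw [if_pos hv, if_pos hv, ih v [k]]
      set F := t.foldl (fun a p => if p.2 > a then p.2 else a) v with hF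
      simp only [Prod.mk.injEq]
      refine ⟨trivial, ?_⟩
      rw [if_neg (show ¬ F = m by omega)]
      by_cases he : F = v
      · rw [if_pos he, if_pos (show (v == F) = true by simp [he])]
        simp
      · rw [if_neg he, if_neg (show ¬ (v == F) = true by simp only [beq_iff_eq]; omega)]
    · rw [if_neg hv, if_neg hv]
      have hgem := pvMaxGe t m
      by_cases he : v = m
      · rw [if_pos (show (v == m) = true by simp [he]), ih m (ks ++ [k])]
        set F := t.foldl (fun a p => if p.2 > a then p.2 else a) m with hF
        simp only [Prod.mk.injEq]
        refine ⟨trivial, ?_⟩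
        by_cases hm : F = m
        · rw [if_pos hm, if_pos hm, if_pos (show (v == F) = true by simp [he, hm])]
          simp
        · rw [if_neg hm, if_neg hm, if_neg (show ¬ (v == F) = true by simp only [beq_iff_eq]; omega)]
      · rw [if_neg (show ¬ (v == m) = true by simp [he]), ih m ks]
        set F := t.foldl (fun a p => if p.2 > a then p.2 else a) m with hF
        simp only [Prod.mk.injEq]
        refine ⟨trivial, ?_⟩
        rw [if_neg (show ¬ (v == F) = true by simp only [beq_iff_eq]; omega)]

-- ===== VERDICT (by name: the statement is the Claim_ definition above) =====
theorem getModus_spec : Claim_equal_getModus := by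
  intro md modus _
  show getModus md modus = getModus_alt md modus
  simp only [getModus, getModus_alt, pvPair,
    PySem.List.foldl_append_if (fun p => p.2 == md.foldl (fun m p => if p.2 > m then p.2 else m) 0) Prod.fst,
    ite_self, List.nil_append]
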